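-- pv_equiv track=rewrite | github.com/snowcrash-labs/data_preprocessing | dataset_analysis/count_voice_ids_by_range.py | categorize_by_range
-- ===== SOURCE A (Python) =====
-- from typing import Dict, List
--
-- def categorize_by_range(voice_id_track_counts: Dict[str, int]) -> Dict[str, List[str]]:
--     """Categorize voice_ids into range bins."""
--     ranges = [
--         (2, 5, "2-5 tracks"),
--         (5, 10, "5-10 tracks"),
--         (10, 30, "10-30 tracks"),
--     ]
--
--     voice_ids_by_range = {desc: [] for _, _, desc in ranges}
--
--     for voice_id, track_count in voice_id_track_counts.items():
--         for min_tracks, max_tracks, desc in ranges: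
--             if max_tracks == float('inf'):
--                 if track_count >= min_tracks:
--                     voice_ids_by_range[desc].append(voice_id)
--                     break
--             else:
--                 if min_tracks <= track_count < max_tracks:
--                     voice_ids_by_range[desc].append(voice_id)
--                     break
--
--     return voice_ids_by_range
-- ===== SOURCE B (Python) =====
-- def categorize_by_range(voice_id_track_counts):
--     """Categorize voice_ids into range bins (one filtering pass per range)."""
--     ranges = [
--         (2, 5, "2-5 tracks"),
--         (5, 10, "5-10 tracks"),
--         (10, 30, "10-30 tracks"),
--     ]
--     items = list(voice_id_track_counts.items())
--     return {
--         desc: [vid for vid, tc in items if lo <= tc < hi]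
--         for lo, hi, desc in ranges
--     }
-- ===== Notes on version B (the rewrite author's own statement) =====
-- stated objective: simpler
-- what changed: Replaces the per-id loop with an inner first-match break over the ranges by a dict comprehension that builds each bin with its own independent filtering pass over the items (loop nesting reversed); correct because the three half-open ranges are pairwise disjoint.
import Mathlib
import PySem

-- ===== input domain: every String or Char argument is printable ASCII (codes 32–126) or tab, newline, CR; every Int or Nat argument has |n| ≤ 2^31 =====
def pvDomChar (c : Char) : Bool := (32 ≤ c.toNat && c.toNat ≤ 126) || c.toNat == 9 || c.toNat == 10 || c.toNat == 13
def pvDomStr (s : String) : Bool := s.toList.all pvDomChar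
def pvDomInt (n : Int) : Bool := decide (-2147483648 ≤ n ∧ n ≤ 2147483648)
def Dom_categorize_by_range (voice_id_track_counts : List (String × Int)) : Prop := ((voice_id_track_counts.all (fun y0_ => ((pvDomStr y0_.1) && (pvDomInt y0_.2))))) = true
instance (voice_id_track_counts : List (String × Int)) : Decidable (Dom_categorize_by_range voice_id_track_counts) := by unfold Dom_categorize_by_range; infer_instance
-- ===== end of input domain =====

-- B replaces A's per-id loop with first-match break by one independent filtering pass per range (loop nesting reversed); objective: simpler.


-- ===== PORT A =====
-- the shared literal 'ranges' list
def pvRanges : List (Int × Int × String) :=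
  [(2, 5, "2-5 tracks"), (5, 10, "5-10 tracks"), (10, 30, "10-30 tracks")]

-- inner 'for min_tracks, max_tracks, desc in ranges' with break; the test
-- "max_tracks == float('inf')" is False for every int bound in 'ranges', so only its else branch is live
def pvInner (d : PySem.Dict String (List String)) (vid : String) (tc : Int) :
    List (Int × Int × String) → PySem.Dict String (List String)
  | [] => d
  | (lo, hi, desc) :: rest =>
      if lo ≤ tc ∧ tc < hi then d.modify desc [] (fun l => l ++ [vid])
      else pvInner d vid tc rest

def categorize_by_range (voice_id_track_counts : List (String × Int)) : List (String × List String) :=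
  -- voice_ids_by_range = {desc: [] for _, _, desc in ranges}
  let init := pvRanges.foldl (fun d r => d.insert r.2.2 []) PySem.Dict.empty
  (voice_id_track_counts.foldl (fun d kv => pvInner d kv.1 kv.2 pvRanges) init).items

-- ===== PORT B =====
def categorize_by_range_alt (voice_id_track_counts : List (String × Int)) : List (String × List String) :=
  pvRanges.map (fun r =>
    (r.2.2, (voice_id_track_counts.filter (fun kv => decide (r.1 ≤ kv.2 ∧ kv.2 < r.2.1))).map Prod.fst))

-- ===== PRECONDITION & SPEC =====
def Spec_categorize_by_range (voice_id_track_counts : List (String × Int)) (out : List (String × List String)) : Prop := out = categorize_by_range_alt voice_id_track_counts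
instance (voice_id_track_counts : List (String × Int)) (out : List (String × List String)) : Decidable (Spec_categorize_by_range voice_id_track_counts out) := by unfold Spec_categorize_by_range; infer_instance

-- ===== CLAIM (what is proved, stated in full; the proofs are below) =====
def Claim_equal_categorize_by_range : Prop := ∀ (voice_id_track_counts : List (String × Int)), Dom_categorize_by_range voice_id_track_counts → Spec_categorize_by_range voice_id_track_counts (categorize_by_range voice_id_track_counts)

-- ===== LEMMAS AND PROOFS =====

-- invariant of A's fold: starting from the three bins b1,b2,b3 it appends exactly B's filters
lemma fold_inner_items (xs : List (String × Int)) :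
    ∀ (b1 b2 b3 : List String),
    (xs.foldl (fun d kv => pvInner d kv.1 kv.2 pvRanges)
      (PySem.Dict.mk [("2-5 tracks", b1), ("5-10 tracks", b2), ("10-30 tracks", b3)])).items
    = [("2-5 tracks", b1 ++ (xs.filter (fun kv => decide ((2:Int) ≤ kv.2 ∧ kv.2 < 5))).map Prod.fst),
       ("5-10 tracks", b2 ++ (xs.filter (fun kv => decide ((5:Int) ≤ kv.2 ∧ kv.2 < 10))).map Prod.fst),
       ("10-30 tracks", b3 ++ (xs.filter (fun kv => decide ((10:Int) ≤ kv.2 ∧ kv.2 < 30))).map Prod.fst)] := by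
  induction xs with
  | nil => intro b1 b2 b3; simp
  | cons kv rest ih =>
    intro b1 b2 b3
    obtain ⟨vid, tc⟩ := kv
    simp only [List.foldl_cons, List.filter_cons]
    by_cases h1 : (2:Int) ≤ tc ∧ tc < 5
    · have hd : pvInner (PySem.Dict.mk [("2-5 tracks", b1), ("5-10 tracks", b2), ("10-30 tracks", b3)]) vid tc pvRanges
          = PySem.Dict.mk [("2-5 tracks", b1 ++ [vid]), ("5-10 tracks", b2), ("10-30 tracks", b3)] := by
        simp [pvInner, pvRanges, h1, PySem.Dict.modify, PySem.Dict.contains, PySem.Dict.getD,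
              PySem.Dict.get?, PySem.Dict.insert, List.find?]
      rw [hd, ih]
      have h2 : ¬((5:Int) ≤ tc ∧ tc < 10) := by omega
      have h3 : ¬((10:Int) ≤ tc ∧ tc < 30) := by omega
      simp [h1, h2, h3]
    · by_cases h2 : (5:Int) ≤ tc ∧ tc < 10
      · have hd : pvInner (PySem.Dict.mk [("2-5 tracks", b1), ("5-10 tracks", b2), ("10-30 tracks", b3)]) vid tc pvRanges
            = PySem.Dict.mk [("2-5 tracks", b1), ("5-10 tracks", b2 ++ [vid]), ("10-30 tracks", b3)] := by
          simp [pvInner, pvRanges, h1, h2, PySem.Dict.modify, PySem.Dict.contains, PySem.Dict.getD,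
                PySem.Dict.get?, PySem.Dict.insert, List.find?]
        rw [hd, ih]
        have h3 : ¬((10:Int) ≤ tc ∧ tc < 30) := by omega
        simp [h1, h2, h3]
      · by_cases h3 : (10:Int) ≤ tc ∧ tc < 30
        · have hd : pvInner (PySem.Dict.mk [("2-5 tracks", b1), ("5-10 tracks", b2), ("10-30 tracks", b3)]) vid tc pvRanges
              = PySem.Dict.mk [("2-5 tracks", b1), ("5-10 tracks", b2), ("10-30 tracks", b3 ++ [vid])] := by
            simp [pvInner, pvRanges, h1, h2, h3, PySem.Dict.modify, PySem.Dict.contains, PySem.Dict.getD,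
                  PySem.Dict.get?, PySem.Dict.insert, List.find?]
          rw [hd, ih]
          simp [h1, h2, h3]
        · have hd : pvInner (PySem.Dict.mk [("2-5 tracks", b1), ("5-10 tracks", b2), ("10-30 tracks", b3)]) vid tc pvRanges
              = PySem.Dict.mk [("2-5 tracks", b1), ("5-10 tracks", b2), ("10-30 tracks", b3)] := by
            simp [pvInner, pvRanges, h1, h2, h3]
          rw [hd, ih]
          simp [h1, h2, h3]

-- ===== VERDICT (by name: the statement is the Claim_ definition above) =====
theorem categorize_by_range_spec : Claim_equal_categorize_by_range := by
  intro xs _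
  unfold Spec_categorize_by_range
  have h : categorize_by_range xs
      = (xs.foldl (fun d kv => pvInner d kv.1 kv.2 pvRanges)
          (PySem.Dict.mk [("2-5 tracks", []), ("5-10 tracks", []), ("10-30 tracks", [])])).items := rfl
  rw [h, fold_inner_items]
  simp [categorize_by_range_alt, pvRanges]
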